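-- pv_equiv track=rewrite | github.com/sumsar158/Python-2021 | EXAM/exam6/exam.py | pear_fear
-- ===== SOURCE A (Python) =====
-- def pear_fear(pears, people):
--     """
--     Pear fear.
--
--     Every 3rd person fears pears, so they won't get any.
--     How many pears will each get?
--     Everyone who is not afraid of pears gets equal number of pears.
--     Only whole pears will be used, so some pears may remain.
--
--     #4
--
--     :param pears:
--     :param people:
--     :return:
--     """
--     poeple_list = []
--     for i in range(people + 1):
--         poeple_list.append(i)
--     for i in poeple_list[::3]:
--         poeple_list.remove(i)
--
--     people = len(poeple_list)
--     pears = pears // people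
--
--     return pears
-- ===== SOURCE B (Python) =====
-- def pear_fear(pears, people):
--     # Closed form: of people people, every 3rd (1-indexed convention of A's
--     # slice [::3] over [0..people]) fears pears, leaving people - people//3
--     # eaters; each gets an equal whole-pear share.
--     return pears // (people - people // 3)
-- ===== Notes on version B (the rewrite author's own statement) =====
-- stated objective: faster
-- what changed: Replaced the O(n^2) build-list-then-remove-every-3rd simulation with the closed form pears // (people - people//3).
import Mathlib
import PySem

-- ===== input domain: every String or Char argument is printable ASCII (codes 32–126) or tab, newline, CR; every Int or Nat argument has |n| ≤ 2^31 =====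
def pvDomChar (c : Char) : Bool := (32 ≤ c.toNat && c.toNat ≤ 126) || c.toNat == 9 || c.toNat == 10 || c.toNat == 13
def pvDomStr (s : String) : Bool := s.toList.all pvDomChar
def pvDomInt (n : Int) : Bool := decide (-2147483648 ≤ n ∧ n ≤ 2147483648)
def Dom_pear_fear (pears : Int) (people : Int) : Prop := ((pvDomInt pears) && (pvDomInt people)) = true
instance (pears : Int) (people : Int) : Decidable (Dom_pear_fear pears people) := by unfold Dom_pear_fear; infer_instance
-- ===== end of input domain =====

-- B replaces A's O(people^2) build-then-remove-every-3rd list simulation by the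
-- closed form pears // (people - people // 3); return values agree wherever A returns.

-- ===== PORT A =====
def pear_fear (pears : Int) (people : Int) : Int :=
  -- poeple_list = []; for i in range(people+1): poeple_list.append(i)
  let poeple_list : List Int :=
    (PySem.List.pyRange 0 (people + 1) 1).foldl (fun acc i => acc ++ [i]) []
  -- for i in poeple_list[::3]: poeple_list.remove(i)
  let poeple_list : List Int :=
    ((PySem.List.slice? poeple_list none none 3).getD []).foldl
      (fun acc i => (PySem.List.remove? acc i).getD acc) poeple_list
  -- people = len(poeple_list); pears = pears // people
  PySem.Int.floordiv pears (poeple_list.length : Int)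

-- ===== PORT B =====
def pear_fear_alt (pears : Int) (people : Int) : Int :=
  PySem.Int.floordiv pears (people - PySem.Int.floordiv people 3)

-- ===== PRECONDITION & SPEC =====
-- A raises ZeroDivisionError for people ≤ 0 (the list of eaters is empty).
def Pre_pear_fear (pears : Int) (people : Int) : Prop := 1 ≤ people
instance (pears : Int) (people : Int) : Decidable (Pre_pear_fear pears people) := by
  unfold Pre_pear_fear; infer_instance
def pvWitness_pear_fear : Int × Int := (7, 5)

def Spec_pear_fear (pears : Int) (people : Int) (out : Int) : Prop := out = pear_fear_alt pears people
instance (pears : Int) (people : Int) (out : Int) : Decidable (Spec_pear_fear pears people out) := by unfold Spec_pear_fear; infer_instance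

-- ===== CLAIM (what is proved, stated in full; the proofs are below) =====
def Claim_equal_pear_fear : Prop := ∀ (pears : Int) (people : Int), Dom_pear_fear pears people → Pre_pear_fear pears people → Spec_pear_fear pears people (pear_fear pears people)

-- ===== LEMMAS AND PROOFS =====

-- appending elements one by one is the list itself
theorem pv_foldl_append (l acc : List Int) :
    l.foldl (fun a i => a ++ [i]) acc = acc ++ l := by
  induction l generalizing acc with
  | nil => simp
  | cons x xs ih => simp [List.foldl, ih]

-- filterMap whose function is everywhere some is a map
theorem pv_filterMap_eq_map (l : List Nat) (f : Nat → Option Int) (g : Nat → Int)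
    (h : ∀ k ∈ l, f k = some (g k)) : l.filterMap f = l.map g := by
  induction l with
  | nil => rfl
  | cons x xs ih =>
    simp [h x (by simp), ih (fun k hk => h k (by simp [hk]))]

-- removing a nodup batch of present elements shrinks the length by the batch size
theorem pv_foldl_remove_length (ys : List Int) : ∀ (xs : List Int), ys.Nodup → xs.Nodup →
    (∀ y ∈ ys, y ∈ xs) →
    (ys.foldl (fun acc i => (PySem.List.remove? acc i).getD acc) xs).length
      = xs.length - ys.length := by
  induction ys with
  | nil => intro xs _ _ _; simp
  | cons y ys ih =>
    intro xs hys hxs hsub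
    have hy : y ∈ xs := hsub y (by simp)
    have hrem := PySem.List.remove?_eq_some_erase xs y hy
    simp only [List.foldl_cons, hrem, Option.getD_some]
    have hlen : (xs.erase y).length = xs.length - 1 := List.length_erase_of_mem hy
    have h1 : ys.Nodup := hys.of_cons
    have h2 : (xs.erase y).Nodup := hxs.erase y
    have h3 : ∀ z ∈ ys, z ∈ xs.erase y := by
      intro z hz
      have hne : z ≠ y := fun h => (List.nodup_cons.mp hys).1 (h ▸ hz)
      exact List.mem_erase_of_ne hne |>.mpr (hsub z (by simp [hz]))
    have hyl : 1 ≤ xs.length := List.length_pos_of_mem hy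
    rw [ih (xs.erase y) h1 h2 h3, hlen]
    simp only [List.length_cons]
    omega

-- the step-3 slice of a nonempty list, unfolded
theorem pv_slice3 (xs : List Int) (hpos : 0 < xs.length) :
    PySem.List.slice? xs none none 3
      = some ((List.range (((xs.length : Int) + 2) / 3).toNat).filterMap
          (fun (k : Nat) => xs[((3 : Int) * (k : Int)).toNat]?)) := by
  simp only [PySem.List.slice?, PySem.List.sliceIndices]
  split_ifs with h1 h2 h3 <;> try omega
  congr 2
  · funext k; norm_num
  · congr 1; omega

theorem pear_fear_spec : Claim_equal_pear_fear := by
  intro pears people _hdom hpre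
  unfold Spec_pear_fear pear_fear pear_fear_alt
  have hp : (1 : Int) ≤ people := hpre
  rw [pv_foldl_append]
  simp only [List.nil_append]
  have hlenxs : (PySem.List.pyRange 0 (people + 1) 1).length = (people + 1).toNat := by
    rw [PySem.List.length_pyRange_one]; omega
  have hpos : 0 < (PySem.List.pyRange 0 (people + 1) 1).length := by omega
  rw [pv_slice3 _ hpos]
  rw [hlenxs]
  have hcnt : (((((people + 1).toNat : Int)) + 2) / 3).toNat = ((people + 3) / 3).toNat := by
    omega
  rw [hcnt]
  have hys : (List.range ((people + 3) / 3).toNat).filterMap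
        (fun (k : Nat) => (PySem.List.pyRange 0 (people + 1) 1)[((3 : Int) * (k : Int)).toNat]?)
      = (List.range ((people + 3) / 3).toNat).map (fun (k : Nat) => (3 * (k : Int))) := by
    apply pv_filterMap_eq_map
    intro k hk
    have hk' : k < ((people + 3) / 3).toNat := List.mem_range.mp hk
    have hidx : (((3 : Int) * (k : Int)).toNat) = 3 * k := by omega
    rw [hidx, PySem.List.getElem?_pyRange_one]
    have hlt : 3 * k < (people + 1 - 0).toNat := by omega
    simp [hlt]
    omega
  rw [hys]
  simp only [Option.getD_some]
  have hnodupxs : (PySem.List.pyRange 0 (people + 1) 1).Nodup :=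
    PySem.List.nodup_pyRange_one 0 (people + 1)
  have hnodupys : ((List.range ((people + 3) / 3).toNat).map (fun (k : Nat) => (3 * (k : Int)))).Nodup := by
    refine List.Nodup.map ?_ List.nodup_range
    intro a b hab
    have : (3 : Int) * a = 3 * b := hab
    omega
  have hsub : ∀ y ∈ (List.range ((people + 3) / 3).toNat).map (fun (k : Nat) => (3 * (k : Int))),
      y ∈ PySem.List.pyRange 0 (people + 1) 1 := by
    intro y hy
    obtain ⟨k, hk, rfl⟩ := List.mem_map.mp hy
    have hk' : k < ((people + 3) / 3).toNat := List.mem_range.mp hk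
    rw [PySem.List.mem_pyRange_one]
    omega
  rw [pv_foldl_remove_length _ _ hnodupys hnodupxs hsub]
  simp only [List.length_map, List.length_range, hlenxs]
  congr 1
  rw [PySem.Int.floordiv_eq_ediv_of_pos (b := 3) (by omega)]
  omega
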